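-- pv_equiv track=rewrite | github.com/milescsmith/gwaslab | src/gwaslab/extension/gwascatalog/sumstats_download.py | _pick_best_sumstats_entry
-- ===== SOURCE A (Python) =====
-- from typing import Any, List, Optional
--
-- def _is_likely_sumstats_file(name: str) -> bool:
--     """Check whether filename looks like a downloadable sumstats file."""
--     lowered = name.lower()
--     if lowered.endswith("/"):
--         return False
--     if lowered.endswith(("-meta.yaml", ".md5", "md5sum.txt", ".sha256", ".tbi", ".log")):
--         return False
--     return lowered.endswith((".tsv.gz", ".txt.gz", ".vcf.gz", ".tsv", ".txt", ".vcf"))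
--
-- def _pick_best_sumstats_entry(entries: List[str], gcst_id: str, prefer_harmonised: bool) -> Optional[str]:
--     """Pick the best sumstats filename from directory entries."""
--     candidates = [entry for entry in entries if _is_likely_sumstats_file(entry)]
--     if not candidates:
--         return None
--
--     gcst_lower = gcst_id.lower()
--     lowered = [entry.lower() for entry in candidates]
--
--     if prefer_harmonised:
--         preferred_patterns = [
--             "{}.h.tsv.gz".format(gcst_lower),
--             "{}.h.txt.gz".format(gcst_lower),
--             "{}.h.vcf.gz".format(gcst_lower),
--             "{}.h.tsv".format(gcst_lower),
--             "{}.h.txt".format(gcst_lower),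
--             "{}.h.vcf".format(gcst_lower),
--         ]
--         for pattern in preferred_patterns:
--             for idx, name in enumerate(lowered):
--                 if name == pattern:
--                     return candidates[idx]
--         for idx, name in enumerate(lowered):
--             if ".h." in name:
--                 return candidates[idx]
--     else:
--         preferred_patterns = [
--             "{}.tsv.gz".format(gcst_lower),
--             "{}.txt.gz".format(gcst_lower),
--             "{}.vcf.gz".format(gcst_lower),
--             "{}.tsv".format(gcst_lower),
--             "{}.txt".format(gcst_lower),
--             "{}.vcf".format(gcst_lower),
--         ]
--         for pattern in preferred_patterns:
--             for idx, name in enumerate(lowered):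
--                 if name == pattern:
--                     return candidates[idx]
--
--     return candidates[0]
-- ===== SOURCE B (Python) =====
-- from typing import List, Optional
--
-- def _is_likely_sumstats_file(name: str) -> bool:
--     """Check whether filename looks like a downloadable sumstats file."""
--     lowered = name.lower()
--     if lowered.endswith("/"):
--         return False
--     if lowered.endswith(("-meta.yaml", ".md5", "md5sum.txt", ".sha256", ".tbi", ".log")):
--         return False
--     return lowered.endswith((".tsv.gz", ".txt.gz", ".vcf.gz", ".tsv", ".txt", ".vcf"))
--
-- def _pick_best_sumstats_entry(entries: List[str], gcst_id: str, prefer_harmonised: bool) -> Optional[str]: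
--     """Pick the best sumstats filename: one pass, ranking each candidate by priority."""
--     candidates = [entry for entry in entries if _is_likely_sumstats_file(entry)]
--     if not candidates:
--         return None
--
--     gcst_lower = gcst_id.lower()
--     mid = ".h" if prefer_harmonised else ""
--     exts = [".tsv.gz", ".txt.gz", ".vcf.gz", ".tsv", ".txt", ".vcf"]
--     prio = {gcst_lower + mid + ext: i for i, ext in enumerate(exts)}
--
--     best, best_rank = None, 8
--     for cand in candidates:
--         low = cand.lower()
--         rank = prio.get(low)
--         if rank is None:
--             rank = 6 if prefer_harmonised and ".h." in low else 7
--         if rank < best_rank: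
--             best, best_rank = cand, rank
--     return best
-- ===== Notes on version B (the rewrite author's own statement) =====
-- stated objective: alternative
-- what changed: A's six pattern-by-pattern scans over the candidate list (plus a separate '.h.' fallback scan) are replaced by one single pass that ranks each candidate via a pattern-to-priority dict (0-5 exact match, 6 harmonised '.h.' fallback, 7 otherwise) and keeps the first candidate of strictly smallest rank.
import Mathlib
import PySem

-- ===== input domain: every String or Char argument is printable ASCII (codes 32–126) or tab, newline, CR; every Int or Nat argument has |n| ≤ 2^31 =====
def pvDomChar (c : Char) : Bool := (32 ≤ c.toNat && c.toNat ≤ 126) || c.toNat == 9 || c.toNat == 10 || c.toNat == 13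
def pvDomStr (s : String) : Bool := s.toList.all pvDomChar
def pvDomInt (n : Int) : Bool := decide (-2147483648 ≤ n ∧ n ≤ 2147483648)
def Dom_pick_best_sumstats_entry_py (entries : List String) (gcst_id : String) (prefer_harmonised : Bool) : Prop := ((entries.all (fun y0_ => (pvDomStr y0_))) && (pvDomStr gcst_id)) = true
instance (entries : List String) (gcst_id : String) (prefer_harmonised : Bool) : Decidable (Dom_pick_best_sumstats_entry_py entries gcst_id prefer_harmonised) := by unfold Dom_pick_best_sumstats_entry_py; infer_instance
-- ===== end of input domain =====

-- B replaces A's nested pattern-by-pattern scans with one single pass that ranks each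
-- candidate via a pattern→priority dict and keeps the first candidate of smallest rank
-- (objective: simpler/alternative single-pass structure; same exact result).

-- ===== PORT A =====
-- shared helper: _is_likely_sumstats_file (identical in Source A and Source B)
def pvIsLikely (name : String) : Bool :=
  let lowered := PySem.Str.lower name
  if PySem.Str.endswith lowered "/" then false
  else if PySem.Str.endswith lowered "-meta.yaml" || PySem.Str.endswith lowered ".md5" ||
          PySem.Str.endswith lowered "md5sum.txt" || PySem.Str.endswith lowered ".sha256" ||
          PySem.Str.endswith lowered ".tbi" || PySem.Str.endswith lowered ".log" then false
  else PySem.Str.endswith lowered ".tsv.gz" || PySem.Str.endswith lowered ".txt.gz" ||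
       PySem.Str.endswith lowered ".vcf.gz" || PySem.Str.endswith lowered ".tsv" ||
       PySem.Str.endswith lowered ".txt" || PySem.Str.endswith lowered ".vcf"

-- A's inner loop: 'for idx, name in enumerate(lowered): if name == pattern: return candidates[idx]'
-- (iterated as the zip of candidates with their lowered forms)
def pvInnerA (pattern : String) : List (String × String) → Option String
  | [] => none
  | (c, l) :: rest => if l == pattern then some c else pvInnerA pattern rest

-- A's outer loop: 'for pattern in preferred_patterns: …'
def pvOuterA (patterns : List String) (pairs : List (String × String)) : Option String :=
  match patterns with
  | [] => none
  | p :: ps =>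
    match pvInnerA p pairs with
    | some c => some c
    | none => pvOuterA ps pairs

-- A's harmonised fallback loop: 'for idx, name in enumerate(lowered): if ".h." in name: …'
def pvHLoopA : List (String × String) → Option String
  | [] => none
  | (c, l) :: rest => if PySem.Str.isIn ".h." l then some c else pvHLoopA rest

def pick_best_sumstats_entry_py (entries : List String) (gcst_id : String) (prefer_harmonised : Bool) : Option String :=
  let candidates := entries.filter pvIsLikely
  if candidates.isEmpty then none
  else
    let gcst_lower := PySem.Str.lower gcst_id
    let lowered := candidates.map PySem.Str.lower
    let pairs := candidates.zip lowered
    if prefer_harmonised then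
      let preferred_patterns := [gcst_lower ++ ".h.tsv.gz", gcst_lower ++ ".h.txt.gz",
        gcst_lower ++ ".h.vcf.gz", gcst_lower ++ ".h.tsv", gcst_lower ++ ".h.txt", gcst_lower ++ ".h.vcf"]
      match pvOuterA preferred_patterns pairs with
      | some c => some c
      | none =>
        match pvHLoopA pairs with
        | some c => some c
        | none => candidates.head?     -- candidates[0] (candidates is nonempty here)
    else
      let preferred_patterns := [gcst_lower ++ ".tsv.gz", gcst_lower ++ ".txt.gz",
        gcst_lower ++ ".vcf.gz", gcst_lower ++ ".tsv", gcst_lower ++ ".txt", gcst_lower ++ ".vcf"]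
      match pvOuterA preferred_patterns pairs with
      | some c => some c
      | none => candidates.head?       -- candidates[0] (candidates is nonempty here)

-- ===== PORT B =====
def pvExts : List String := [".tsv.gz", ".txt.gz", ".vcf.gz", ".tsv", ".txt", ".vcf"]

-- '{gcst_lower + mid + ext: i for i, ext in enumerate(exts)}'
def pvPrio (g mid : String) : PySem.Dict String Int :=
  PySem.Dict.ofList ((PySem.List.enumerate pvExts).map (fun p => (g ++ mid ++ p.2, p.1)))

-- 'rank = prio.get(low); if rank is None: rank = 6 if prefer_harmonised and ".h." in low else 7'
def pvRankB (prio : PySem.Dict String Int) (prefer_harmonised : Bool) (low : String) : Int :=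
  match prio.get? low with
  | some r => r
  | none => if prefer_harmonised && PySem.Str.isIn ".h." low then 6 else 7

-- 'for cand in candidates: … if rank < best_rank: best, best_rank = cand, rank'
def pvScanB (prio : PySem.Dict String Int) (prefer_harmonised : Bool) :
    List String → Option String → Int → Option String
  | [], best, _ => best
  | cand :: rest, best, best_rank =>
    let low := PySem.Str.lower cand
    let rank := pvRankB prio prefer_harmonised low
    if rank < best_rank then pvScanB prio prefer_harmonised rest (some cand) rank
    else pvScanB prio prefer_harmonised rest best best_rank

def pick_best_sumstats_entry_py_alt (entries : List String) (gcst_id : String) (prefer_harmonised : Bool) : Option String :=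
  let candidates := entries.filter pvIsLikely
  if candidates.isEmpty then none
  else
    let gcst_lower := PySem.Str.lower gcst_id
    let mid := if prefer_harmonised then ".h" else ""
    let prio := pvPrio gcst_lower mid
    pvScanB prio prefer_harmonised candidates none 8

-- ===== PRECONDITION & SPEC =====
def Spec_pick_best_sumstats_entry_py (entries : List String) (gcst_id : String) (prefer_harmonised : Bool) (out : Option String) : Prop := out = pick_best_sumstats_entry_py_alt entries gcst_id prefer_harmonised
instance (entries : List String) (gcst_id : String) (prefer_harmonised : Bool) (out : Option String) : Decidable (Spec_pick_best_sumstats_entry_py entries gcst_id prefer_harmonised out) := by unfold Spec_pick_best_sumstats_entry_py; infer_instance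

-- ===== CLAIM (what is proved, stated in full; the proofs are below) =====
def Claim_equal_pick_best_sumstats_entry_py : Prop := ∀ (entries : List String) (gcst_id : String) (prefer_harmonised : Bool), Dom_pick_best_sumstats_entry_py entries gcst_id prefer_harmonised → Spec_pick_best_sumstats_entry_py entries gcst_id prefer_harmonised (pick_best_sumstats_entry_py entries gcst_id prefer_harmonised)

-- ===== LEMMAS AND PROOFS =====

-- proof-side rank of a lowered name: priority 0–5 for an exact pattern match,
-- 6 for a harmonised ".h." fallback hit, 7 otherwise
def pvRk (g : String) (ph : Bool) (l : String) : Nat :=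
  if ph then
    (if l = g ++ ".h.tsv.gz" then 0 else if l = g ++ ".h.txt.gz" then 1 else
     if l = g ++ ".h.vcf.gz" then 2 else if l = g ++ ".h.tsv" then 3 else
     if l = g ++ ".h.txt" then 4 else if l = g ++ ".h.vcf" then 5 else
     if PySem.Str.isIn ".h." l then 6 else 7)
  else
    (if l = g ++ ".tsv.gz" then 0 else if l = g ++ ".txt.gz" then 1 else
     if l = g ++ ".vcf.gz" then 2 else if l = g ++ ".tsv" then 3 else
     if l = g ++ ".txt" then 4 else if l = g ++ ".vcf" then 5 else 7)

def pvFindR (g : String) (ph : Bool) (cs : List String) (k : Nat) : Option String :=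
  cs.find? (fun c => pvRk g ph (PySem.Str.lower c) == k)

def pvChain (g : String) (ph : Bool) (cs : List String) : Nat → Option String
  | 0 => none
  | k + 1 =>
    match pvChain g ph cs k with
    | some c => some c
    | none => pvFindR g ph cs k

theorem pvRk_le (g : String) (ph : Bool) (l : String) : pvRk g ph l ≤ 7 := by
  unfold pvRk; split_ifs <;> simp_all

theorem pvApp_ne (g : String) {a b : String} (h : a ≠ b) : g ++ a ≠ g ++ b :=
  fun h' => h ((String.append_right_inj g).mp h')

theorem get?_pvPrio (g mid l : String) : (pvPrio g mid).get? l =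
    if l = g ++ (mid ++ ".tsv.gz") then some 0 else if l = g ++ (mid ++ ".txt.gz") then some 1 else
    if l = g ++ (mid ++ ".vcf.gz") then some 2 else if l = g ++ (mid ++ ".tsv") then some 3 else
    if l = g ++ (mid ++ ".txt") then some 4 else if l = g ++ (mid ++ ".vcf") then some 5 else none := by
  have hne : ∀ (a b : String), a ≠ b → g ++ (mid ++ a) ≠ g ++ (mid ++ b) := by
    intro a b h h'
    exact h ((String.append_right_inj mid).mp ((String.append_right_inj g).mp h'))
  simp only [pvPrio, pvExts, PySem.List.enumerate_cons, PySem.List.enumerate_nil,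
    PySem.Dict.ofList, PySem.Dict.update, List.map, List.foldl, String.append_assoc,
    PySem.Dict.get?_insert, PySem.Dict.get?_empty]
  by_cases h0 : l = g ++ (mid ++ ".tsv.gz") <;> by_cases h1 : l = g ++ (mid ++ ".txt.gz") <;>
  by_cases h2 : l = g ++ (mid ++ ".vcf.gz") <;> by_cases h3 : l = g ++ (mid ++ ".tsv") <;>
  by_cases h4 : l = g ++ (mid ++ ".txt") <;> by_cases h5 : l = g ++ (mid ++ ".vcf") <;>
    first
      | (exfalso
         first
           | exact hne _ _ (by decide) (h0 ▸ h1)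
           | exact hne _ _ (by decide) (h0 ▸ h2)
           | exact hne _ _ (by decide) (h0 ▸ h3)
           | exact hne _ _ (by decide) (h0 ▸ h4)
           | exact hne _ _ (by decide) (h0 ▸ h5)
           | exact hne _ _ (by decide) (h1 ▸ h2)
           | exact hne _ _ (by decide) (h1 ▸ h3)
           | exact hne _ _ (by decide) (h1 ▸ h4)
           | exact hne _ _ (by decide) (h1 ▸ h5)
           | exact hne _ _ (by decide) (h2 ▸ h3)
           | exact hne _ _ (by decide) (h2 ▸ h4)
           | exact hne _ _ (by decide) (h2 ▸ h5)
           | exact hne _ _ (by decide) (h3 ▸ h4)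
           | exact hne _ _ (by decide) (h3 ▸ h5)
           | exact hne _ _ (by decide) (h4 ▸ h5))
      | simp [h0, h1, h2, h3, h4, h5]

theorem pvRankB_eq_t (g l : String) :
    pvRankB (pvPrio g ".h") true l = (pvRk g true l : Int) := by
  unfold pvRankB
  rw [get?_pvPrio]
  simp only [pvRk, if_true,
    show (".h":String) ++ ".tsv.gz" = ".h.tsv.gz" from rfl,
    show (".h":String) ++ ".txt.gz" = ".h.txt.gz" from rfl,
    show (".h":String) ++ ".vcf.gz" = ".h.vcf.gz" from rfl,
    show (".h":String) ++ ".tsv" = ".h.tsv" from rfl,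
    show (".h":String) ++ ".txt" = ".h.txt" from rfl,
    show (".h":String) ++ ".vcf" = ".h.vcf" from rfl, Bool.true_and]
  split_ifs <;> rfl

theorem pvRankB_eq_f (g l : String) :
    pvRankB (pvPrio g "") false l = (pvRk g false l : Int) := by
  unfold pvRankB
  rw [get?_pvPrio]
  simp only [pvRk, Bool.false_and, Bool.false_eq_true, if_false,
    show ("":String) ++ ".tsv.gz" = ".tsv.gz" from rfl,
    show ("":String) ++ ".txt.gz" = ".txt.gz" from rfl,
    show ("":String) ++ ".vcf.gz" = ".vcf.gz" from rfl,
    show ("":String) ++ ".tsv" = ".tsv" from rfl,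
    show ("":String) ++ ".txt" = ".txt" from rfl,
    show ("":String) ++ ".vcf" = ".vcf" from rfl]
  split_ifs <;> rfl

theorem pvInnerA_eq (g : String) (ph : Bool) (pat : String) (k : Nat) (cs : List String)
    (hiff : ∀ c, (PySem.Str.lower c == pat) = (pvRk g ph (PySem.Str.lower c) == k)) :
    pvInnerA pat (cs.zip (cs.map PySem.Str.lower)) = pvFindR g ph cs k := by
  induction cs with
  | nil => rfl
  | cons c rest ih =>
    simp only [List.map_cons, List.zip_cons_cons, pvInnerA, pvFindR, List.find?]
    rw [hiff c]
    cases h : (pvRk g ph (PySem.Str.lower c) == k) <;> simp [ih, pvFindR]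

theorem pvFindR_cons (g : String) (ph : Bool) (c : String) (cs : List String) (k : Nat) :
    pvFindR g ph (c :: cs) k =
      if pvRk g ph (PySem.Str.lower c) = k then some c else pvFindR g ph cs k := by
  simp [pvFindR, List.find?]
  cases h : (pvRk g ph (PySem.Str.lower c) == k) <;> simp_all

theorem pvChain_cons_of_ge (g : String) (ph : Bool) (c : String) (cs : List String) (k : Nat)
    (h : k ≤ pvRk g ph (PySem.Str.lower c)) :
    pvChain g ph (c :: cs) k = pvChain g ph cs k := by
  induction k with
  | zero => rfl
  | succ m ih =>
    simp only [pvChain, ih (by omega), pvFindR_cons]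
    rw [if_neg (by omega)]

theorem pvChain_cons_of_lt (g : String) (ph : Bool) (c : String) (cs : List String) (k : Nat)
    (h : pvRk g ph (PySem.Str.lower c) < k) :
    pvChain g ph (c :: cs) k =
      match pvChain g ph cs (pvRk g ph (PySem.Str.lower c)) with
      | some c' => some c'
      | none => some c := by
  induction k with
  | zero => omega
  | succ m ih =>
    rcases Nat.lt_or_ge (pvRk g ph (PySem.Str.lower c)) m with hm | hm
    · simp only [pvChain, ih hm]
      cases pvChain g ph cs (pvRk g ph (PySem.Str.lower c)) <;> simp
    · have hem : pvRk g ph (PySem.Str.lower c) = m := by omega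
      simp only [pvChain, pvChain_cons_of_ge g ph c cs m (by omega), pvFindR_cons, hem]
      cases pvChain g ph cs m <;> simp

theorem pvChain_nil (g : String) (ph : Bool) (k : Nat) : pvChain g ph [] k = none := by
  induction k with
  | zero => rfl
  | succ m ih => simp [pvChain, ih, pvFindR]

theorem pvScanB_eq_chain (g : String) (ph : Bool) (prio : PySem.Dict String Int)
    (hr : ∀ l, pvRankB prio ph l = (pvRk g ph l : Int)) :
    ∀ (cs : List String) (b : Option String) (k : Nat), k ≤ 8 →
      pvScanB prio ph cs b (k : Int) =
        match pvChain g ph cs k with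
        | some c => some c
        | none => b := by
  intro cs
  induction cs with
  | nil => intro b k _; simp [pvScanB, pvChain_nil]
  | cons c rest ih =>
    intro b k hk
    simp only [pvScanB, hr]
    rcases Nat.lt_or_ge (pvRk g ph (PySem.Str.lower c)) k with hlt | hge
    · rw [if_pos (by exact_mod_cast hlt)]
      rw [ih (some c) (pvRk g ph (PySem.Str.lower c)) (by have := pvRk_le g ph (PySem.Str.lower c); omega)]
      rw [pvChain_cons_of_lt g ph c rest k hlt]
      cases pvChain g ph rest (pvRk g ph (PySem.Str.lower c)) <;> simp
    · rw [if_neg (by exact_mod_cast Nat.not_lt.mpr hge)]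
      rw [ih b k hk, pvChain_cons_of_ge g ph c rest k hge]

-- pattern-match tests against A's patterns coincide with rank-equality tests
set_option maxHeartbeats 1000000 in
theorem pvRk_beq_f (g l : String) :
    ((l == g ++ ".tsv.gz") = (pvRk g false l == 0)) ∧
    ((l == g ++ ".txt.gz") = (pvRk g false l == 1)) ∧
    ((l == g ++ ".vcf.gz") = (pvRk g false l == 2)) ∧
    ((l == g ++ ".tsv") = (pvRk g false l == 3)) ∧
    ((l == g ++ ".txt") = (pvRk g false l == 4)) ∧
    ((l == g ++ ".vcf") = (pvRk g false l == 5)) := by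
  have n01 := pvApp_ne g (a := ".tsv.gz") (b := ".txt.gz") (by decide)
  have n02 := pvApp_ne g (a := ".tsv.gz") (b := ".vcf.gz") (by decide)
  have n03 := pvApp_ne g (a := ".tsv.gz") (b := ".tsv") (by decide)
  have n04 := pvApp_ne g (a := ".tsv.gz") (b := ".txt") (by decide)
  have n05 := pvApp_ne g (a := ".tsv.gz") (b := ".vcf") (by decide)
  have n12 := pvApp_ne g (a := ".txt.gz") (b := ".vcf.gz") (by decide)
  have n13 := pvApp_ne g (a := ".txt.gz") (b := ".tsv") (by decide)
  have n14 := pvApp_ne g (a := ".txt.gz") (b := ".txt") (by decide)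
  have n15 := pvApp_ne g (a := ".txt.gz") (b := ".vcf") (by decide)
  have n23 := pvApp_ne g (a := ".vcf.gz") (b := ".tsv") (by decide)
  have n24 := pvApp_ne g (a := ".vcf.gz") (b := ".txt") (by decide)
  have n25 := pvApp_ne g (a := ".vcf.gz") (b := ".vcf") (by decide)
  have n34 := pvApp_ne g (a := ".tsv") (b := ".txt") (by decide)
  have n35 := pvApp_ne g (a := ".tsv") (b := ".vcf") (by decide)
  have n45 := pvApp_ne g (a := ".txt") (b := ".vcf") (by decide)
  unfold pvRk
  simp only [Bool.false_eq_true, if_false]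
  refine ⟨?_, ?_, ?_, ?_, ?_, ?_⟩ <;> (split_ifs <;> simp_all)

set_option maxHeartbeats 1000000 in
theorem pvRk_beq_t (g l : String) :
    ((l == g ++ ".h.tsv.gz") = (pvRk g true l == 0)) ∧
    ((l == g ++ ".h.txt.gz") = (pvRk g true l == 1)) ∧
    ((l == g ++ ".h.vcf.gz") = (pvRk g true l == 2)) ∧
    ((l == g ++ ".h.tsv") = (pvRk g true l == 3)) ∧
    ((l == g ++ ".h.txt") = (pvRk g true l == 4)) ∧
    ((l == g ++ ".h.vcf") = (pvRk g true l == 5)) := by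
  have n01 := pvApp_ne g (a := ".h.tsv.gz") (b := ".h.txt.gz") (by decide)
  have n02 := pvApp_ne g (a := ".h.tsv.gz") (b := ".h.vcf.gz") (by decide)
  have n03 := pvApp_ne g (a := ".h.tsv.gz") (b := ".h.tsv") (by decide)
  have n04 := pvApp_ne g (a := ".h.tsv.gz") (b := ".h.txt") (by decide)
  have n05 := pvApp_ne g (a := ".h.tsv.gz") (b := ".h.vcf") (by decide)
  have n12 := pvApp_ne g (a := ".h.txt.gz") (b := ".h.vcf.gz") (by decide)
  have n13 := pvApp_ne g (a := ".h.txt.gz") (b := ".h.tsv") (by decide)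
  have n14 := pvApp_ne g (a := ".h.txt.gz") (b := ".h.txt") (by decide)
  have n15 := pvApp_ne g (a := ".h.txt.gz") (b := ".h.vcf") (by decide)
  have n23 := pvApp_ne g (a := ".h.vcf.gz") (b := ".h.tsv") (by decide)
  have n24 := pvApp_ne g (a := ".h.vcf.gz") (b := ".h.txt") (by decide)
  have n25 := pvApp_ne g (a := ".h.vcf.gz") (b := ".h.vcf") (by decide)
  have n34 := pvApp_ne g (a := ".h.tsv") (b := ".h.txt") (by decide)
  have n35 := pvApp_ne g (a := ".h.tsv") (b := ".h.vcf") (by decide)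
  have n45 := pvApp_ne g (a := ".h.txt") (b := ".h.vcf") (by decide)
  unfold pvRk
  simp only [if_true]
  refine ⟨?_, ?_, ?_, ?_, ?_, ?_⟩ <;> (split_ifs <;> simp_all)

theorem pvHLoopA_eq (g : String) (cs : List String)
    (h : ∀ c ∈ cs, 6 ≤ pvRk g true (PySem.Str.lower c)) :
    pvHLoopA (cs.zip (cs.map PySem.Str.lower)) = pvFindR g true cs 6 := by
  induction cs with
  | nil => rfl
  | cons c rest ih =>
    have hc := h c (List.mem_cons_self ..)
    have hiff : (PySem.Str.isIn ".h." (PySem.Str.lower c)) =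
        (pvRk g true (PySem.Str.lower c) == 6) := by
      revert hc
      unfold pvRk
      simp only [if_true]
      split_ifs <;> simp_all
    simp only [List.map_cons, List.zip_cons_cons, pvHLoopA, pvFindR, List.find?]
    rw [hiff]
    cases hb : (pvRk g true (PySem.Str.lower c) == 6) <;>
      simp [ih (fun c hc => h c (List.mem_cons_of_mem _ hc)), pvFindR]

theorem pvRk_f_ne_6 (g l : String) : pvRk g false l ≠ 6 := by
  unfold pvRk; split_ifs <;> simp_all

theorem pvFindR_seven (g : String) (ph : Bool) (cs : List String)
    (h : ∀ c ∈ cs, pvRk g ph (PySem.Str.lower c) = 7) :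
    pvFindR g ph cs 7 = cs.head? := by
  cases cs with
  | nil => rfl
  | cons c rest => simp [pvFindR, List.find?, h c (List.mem_cons_self ..)]

theorem pvFindR_none (g : String) (ph : Bool) (cs : List String) (k : Nat)
    (h : pvFindR g ph cs k = none) : ∀ c ∈ cs, pvRk g ph (PySem.Str.lower c) ≠ k := by
  intro c hc
  have := List.find?_eq_none.mp h c hc
  simpa using this

theorem pvFindR_none_of (g : String) (ph : Bool) (cs : List String) (k : Nat)
    (h : ∀ c ∈ cs, pvRk g ph (PySem.Str.lower c) ≠ k) : pvFindR g ph cs k = none :=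
  List.find?_eq_none.mpr (by intro c hc; simpa using h c hc)

-- the core equality, for a nonempty candidate list
theorem pvMain_false (g : String) (cands : List String) (hne : cands ≠ []) :
    (match pvOuterA [g ++ ".tsv.gz", g ++ ".txt.gz", g ++ ".vcf.gz", g ++ ".tsv",
        g ++ ".txt", g ++ ".vcf"] (cands.zip (cands.map PySem.Str.lower)) with
     | some c => some c
     | none => cands.head?)
    = pvScanB (pvPrio g "") false cands none 8 := by
  have hB := pvScanB_eq_chain g false (pvPrio g "") (pvRankB_eq_f g) cands none 8 (by omega)
  rw [show (((8:Nat)):Int) = (8:Int) from rfl] at hB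
  rw [hB]
  simp only [pvOuterA,
    pvInnerA_eq g false _ 0 cands (fun c => (pvRk_beq_f g (PySem.Str.lower c)).1),
    pvInnerA_eq g false _ 1 cands (fun c => (pvRk_beq_f g (PySem.Str.lower c)).2.1),
    pvInnerA_eq g false _ 2 cands (fun c => (pvRk_beq_f g (PySem.Str.lower c)).2.2.1),
    pvInnerA_eq g false _ 3 cands (fun c => (pvRk_beq_f g (PySem.Str.lower c)).2.2.2.1),
    pvInnerA_eq g false _ 4 cands (fun c => (pvRk_beq_f g (PySem.Str.lower c)).2.2.2.2.1),
    pvInnerA_eq g false _ 5 cands (fun c => (pvRk_beq_f g (PySem.Str.lower c)).2.2.2.2.2)]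
  cases h0 : pvFindR g false cands 0 with
  | some c => simp [pvChain, h0]
  | none =>
  cases h1 : pvFindR g false cands 1 with
  | some c => simp [pvChain, h0, h1]
  | none =>
  cases h2 : pvFindR g false cands 2 with
  | some c => simp [pvChain, h0, h1, h2]
  | none =>
  cases h3 : pvFindR g false cands 3 with
  | some c => simp [pvChain, h0, h1, h2, h3]
  | none =>
  cases h4 : pvFindR g false cands 4 with
  | some c => simp [pvChain, h0, h1, h2, h3, h4]
  | none =>
  cases h5 : pvFindR g false cands 5 with
  | some c => simp [pvChain, h0, h1, h2, h3, h4, h5]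
  | none =>
    have hall : ∀ c ∈ cands, pvRk g false (PySem.Str.lower c) = 7 := by
      intro c hc
      have k0 := pvFindR_none g false cands 0 h0 c hc
      have k1 := pvFindR_none g false cands 1 h1 c hc
      have k2 := pvFindR_none g false cands 2 h2 c hc
      have k3 := pvFindR_none g false cands 3 h3 c hc
      have k4 := pvFindR_none g false cands 4 h4 c hc
      have k5 := pvFindR_none g false cands 5 h5 c hc
      have k6 := pvRk_f_ne_6 g (PySem.Str.lower c)
      have k7 := pvRk_le g false (PySem.Str.lower c)
      omega
    have h6 : pvFindR g false cands 6 = none :=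
      pvFindR_none_of g false cands 6 (fun c hc => pvRk_f_ne_6 g (PySem.Str.lower c))
    have h7 : pvFindR g false cands 7 = cands.head? := pvFindR_seven g false cands hall
    obtain ⟨c0, cs', hcc⟩ := List.exists_cons_of_ne_nil hne
    subst hcc
    simp [pvChain, h0, h1, h2, h3, h4, h5, h6, h7]

theorem pvMain_true (g : String) (cands : List String) (hne : cands ≠ []) :
    (match pvOuterA [g ++ ".h.tsv.gz", g ++ ".h.txt.gz", g ++ ".h.vcf.gz", g ++ ".h.tsv",
        g ++ ".h.txt", g ++ ".h.vcf"] (cands.zip (cands.map PySem.Str.lower)) with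
     | some c => some c
     | none =>
       match pvHLoopA (cands.zip (cands.map PySem.Str.lower)) with
       | some c => some c
       | none => cands.head?)
    = pvScanB (pvPrio g ".h") true cands none 8 := by
  have hB := pvScanB_eq_chain g true (pvPrio g ".h") (pvRankB_eq_t g) cands none 8 (by omega)
  rw [show (((8:Nat)):Int) = (8:Int) from rfl] at hB
  rw [hB]
  simp only [pvOuterA,
    pvInnerA_eq g true _ 0 cands (fun c => (pvRk_beq_t g (PySem.Str.lower c)).1),
    pvInnerA_eq g true _ 1 cands (fun c => (pvRk_beq_t g (PySem.Str.lower c)).2.1),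
    pvInnerA_eq g true _ 2 cands (fun c => (pvRk_beq_t g (PySem.Str.lower c)).2.2.1),
    pvInnerA_eq g true _ 3 cands (fun c => (pvRk_beq_t g (PySem.Str.lower c)).2.2.2.1),
    pvInnerA_eq g true _ 4 cands (fun c => (pvRk_beq_t g (PySem.Str.lower c)).2.2.2.2.1),
    pvInnerA_eq g true _ 5 cands (fun c => (pvRk_beq_t g (PySem.Str.lower c)).2.2.2.2.2)]
  cases h0 : pvFindR g true cands 0 with
  | some c => simp [pvChain, h0]
  | none =>
  cases h1 : pvFindR g true cands 1 with
  | some c => simp [pvChain, h0, h1]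
  | none =>
  cases h2 : pvFindR g true cands 2 with
  | some c => simp [pvChain, h0, h1, h2]
  | none =>
  cases h3 : pvFindR g true cands 3 with
  | some c => simp [pvChain, h0, h1, h2, h3]
  | none =>
  cases h4 : pvFindR g true cands 4 with
  | some c => simp [pvChain, h0, h1, h2, h3, h4]
  | none =>
  cases h5 : pvFindR g true cands 5 with
  | some c => simp [pvChain, h0, h1, h2, h3, h4, h5]
  | none =>
    have hge : ∀ c ∈ cands, 6 ≤ pvRk g true (PySem.Str.lower c) := by
      intro c hc
      have k0 := pvFindR_none g true cands 0 h0 c hc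
      have k1 := pvFindR_none g true cands 1 h1 c hc
      have k2 := pvFindR_none g true cands 2 h2 c hc
      have k3 := pvFindR_none g true cands 3 h3 c hc
      have k4 := pvFindR_none g true cands 4 h4 c hc
      have k5 := pvFindR_none g true cands 5 h5 c hc
      omega
    rw [pvHLoopA_eq g cands hge]
    cases h6 : pvFindR g true cands 6 with
    | some c => simp [pvChain, h0, h1, h2, h3, h4, h5, h6]
    | none =>
      have hall : ∀ c ∈ cands, pvRk g true (PySem.Str.lower c) = 7 := by
        intro c hc
        have k6 := pvFindR_none g true cands 6 h6 c hc
        have k7 := pvRk_le g true (PySem.Str.lower c)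
        have := hge c hc
        omega
      have h7 : pvFindR g true cands 7 = cands.head? := pvFindR_seven g true cands hall
      obtain ⟨c0, cs', hcc⟩ := List.exists_cons_of_ne_nil hne
      subst hcc
      simp [pvChain, h0, h1, h2, h3, h4, h5, h6, h7]

theorem pick_best_sumstats_entry_py_spec : Claim_equal_pick_best_sumstats_entry_py := by
  intro entries gcst_id ph _hdom
  unfold Spec_pick_best_sumstats_entry_py
  unfold pick_best_sumstats_entry_py pick_best_sumstats_entry_py_alt
  cases hemp : (entries.filter pvIsLikely).isEmpty with
  | true => simp [hemp]
  | false =>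
    have hne : entries.filter pvIsLikely ≠ [] := by
      intro h; rw [h] at hemp; simp at hemp
    cases ph with
    | false =>
      simpa only [hemp, Bool.false_eq_true, if_false] using
        pvMain_false (PySem.Str.lower gcst_id) (entries.filter pvIsLikely) hne
    | true =>
      simpa only [hemp, if_true, Bool.false_eq_true, if_false] using
        pvMain_true (PySem.Str.lower gcst_id) (entries.filter pvIsLikely) hne
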